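-- pv_equiv track=rewrite | github.com/rjhansen/pluspora-algo | depthfirst/dev/1/depthfirst.py | depthfirst
-- ===== SOURCE A (Python) =====
-- from typing import Dict
--
-- _MAZE: Dict[str, str] = {
--     "A": "BE",
--     "B": "A",
--     "C": "GD",
--     "D": "CH",
--     "E": "AI",
--     "F": "GJ",
--     "G": "FC",
--     "H": "DL",
--     "I": "EMJ",
--     "J": "FIN",
--     "K": "LO",
--     "L": "KHP",
--     "M": "IQ",
--     "N": "JOR",
--     "O": "NKS",
--     "P": "L",
--     "Q": "MR",
--     "R": "QNS",
--     "S": "ROT",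
--     "T": "S"
-- }
--
-- def depthfirst(current: str, finish: str, rope:str=""):
--     """Uses naïve depth-first search to find an optimal route
--     out of the Minotaur's maze."""
--
--     rope += current
--
--     if current == finish:
--         return rope
--
--     portals = [X for X in _MAZE[current] if X not in rope]
--
--     for portal in portals:
--         route = depthfirst(portal, finish, rope)
--         if route:
--             return route
--
--     return None
-- ===== SOURCE B (Python) =====
-- from typing import Dict
--
-- _MAZE: Dict[str, str] = {
--     "A": "BE", "B": "A", "C": "GD", "D": "CH", "E": "AI", "F": "GJ",
--     "G": "FC", "H": "DL", "I": "EMJ", "J": "FIN", "K": "LO", "L": "KHP",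
--     "M": "IQ", "N": "JOR", "O": "NKS", "P": "L", "Q": "MR", "R": "QNS",
--     "S": "ROT", "T": "S"
-- }
--
-- def depthfirst(current: str, finish: str, rope: str = ""):
--     """Iterative depth-first search with an explicit stack of
--     (node, rope-so-far) states instead of recursion."""
--     stack = [(current, rope)]
--     while stack:
--         node, sofar = stack.pop()
--         new_rope = sofar + node
--         if node == finish:
--             return new_rope
--         for portal in reversed(_MAZE[node]):
--             if portal not in new_rope:
--                 stack.append((portal, new_rope))
--     return None
-- ===== Notes on version B (the rewrite author's own statement) =====
-- stated objective: alternative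
-- what changed: Replaced the recursive DFS (recursion + inner for-loop over portals) by an iterative DFS driven by an explicit stack of (node, rope-so-far) states, pushing unvisited neighbours in reversed order so pops reproduce the recursion's exploration order.
import Mathlib
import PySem

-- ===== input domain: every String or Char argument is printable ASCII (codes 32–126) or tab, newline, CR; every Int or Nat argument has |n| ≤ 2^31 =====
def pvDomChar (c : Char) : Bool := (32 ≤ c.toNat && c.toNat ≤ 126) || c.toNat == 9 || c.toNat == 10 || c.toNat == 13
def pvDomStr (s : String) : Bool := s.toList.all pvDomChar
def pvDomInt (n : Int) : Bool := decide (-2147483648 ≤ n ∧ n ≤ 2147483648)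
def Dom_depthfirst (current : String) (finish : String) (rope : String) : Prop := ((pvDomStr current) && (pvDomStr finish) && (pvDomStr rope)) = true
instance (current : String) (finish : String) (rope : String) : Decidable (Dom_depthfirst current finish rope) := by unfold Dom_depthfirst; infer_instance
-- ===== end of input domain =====

-- B replaces the recursive DFS by an iterative DFS with an explicit stack of (node, rope) states; same results, same cost (objective: alternative).


-- ===== PORT A =====
def MAZE : PySem.Dict String String := PySem.Dict.ofList
  [("A", "BE"), ("B", "A"), ("C", "GD"), ("D", "CH"), ("E", "AI"), ("F", "GJ"),
   ("G", "FC"), ("H", "DL"), ("I", "EMJ"), ("J", "FIN"), ("K", "LO"), ("L", "KHP"),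
   ("M", "IQ"), ("N", "JOR"), ("O", "NKS"), ("P", "L"), ("Q", "MR"), ("R", "QNS"),
   ("S", "ROT"), ("T", "S")]

mutual
-- recursive DFS of A; fuel only totalises the recursion (25 is never exhausted: recursion depth ≤ 21, proved via the K-measure below).
-- 'X not in rope' with X a single char is exactly char membership in rope's characters.
def goA : Nat → String → String → String → Option String
  | 0, _, _, _ => none
  | df + 1, current, finish, rope =>
    let rope' := rope ++ current
    if current = finish then some rope'
    else
      match MAZE.get? current with
      | none => none   -- Python raises KeyError here: excluded by Pre_depthfirst
      | some nbrs =>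
        loopA df (nbrs.toList.filter (fun X => !(rope'.toList.contains X))) finish rope'
termination_by df _ _ _ => (df, 0)
-- the 'for portal in portals: … if route: return route' loop ('if route:' is false for None and for the empty string)
def loopA : Nat → List Char → String → String → Option String
  | _, [], _, _ => none
  | df, p :: ps, finish, rope' =>
    match goA df p.toString finish rope' with
    | some route => if route = "" then loopA df ps finish rope' else some route
    | none => loopA df ps finish rope'
termination_by df ps _ _ => (df, ps.length + 1)
end

def depthfirst (current : String) (finish : String) (rope : String) : Option String :=
  goA 25 current finish rope

-- ===== PORT B =====
-- iterative DFS of Source B: pop a (node, rope) state, return on finish, else push unvisited neighbours in reversed order.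
-- fuel only totalises the while-loop (4^21 is never exhausted: proved via the stack measure W below).
def stepB : Nat → List (String × String) → String → Option String
  | 0, _, _ => none
  | _ + 1, [], _ => none
  | sf + 1, (node, sofar) :: rest, finish =>
    let nr := sofar ++ node
    if node = finish then some nr
    else
      match MAZE.get? node with
      | none => none   -- Python raises KeyError here: excluded by Pre_depthfirst
      | some nbrs =>
        stepB sf (nbrs.toList.reverse.foldl
          (fun st c => if !(nr.toList.contains c) then (c.toString, nr) :: st else st) rest) finish

def depthfirst_alt (current : String) (finish : String) (rope : String) : Option String :=
  stepB (4 ^ 21) [(current, rope)] finish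

-- ===== PRECONDITION & SPEC =====
-- Pre_ excludes exactly the inputs where Python A raises KeyError: current not a maze key (and ≠ finish).
def Pre_depthfirst (current : String) (finish : String) (rope : String) : Prop :=
  current = finish ∨ (MAZE.get? current).isSome = true
instance (current : String) (finish : String) (rope : String) : Decidable (Pre_depthfirst current finish rope) := by unfold Pre_depthfirst; infer_instance
def pvWitness_depthfirst : String × String × String := ("A", "T", "")

def Spec_depthfirst (current : String) (finish : String) (rope : String) (out : Option String) : Prop := out = depthfirst_alt current finish rope
instance (current : String) (finish : String) (rope : String) (out : Option String) : Decidable (Spec_depthfirst current finish rope out) := by unfold Spec_depthfirst; infer_instance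

-- ===== CLAIM (what is proved, stated in full; the proofs are below) =====
def Claim_equal_depthfirst : Prop := ∀ (current : String) (finish : String) (rope : String), Dom_depthfirst current finish rope → Pre_depthfirst current finish rope → Spec_depthfirst current finish rope (depthfirst current finish rope)

-- ===== LEMMAS AND PROOFS =====

-- the 20 maze letters
def KEYSL : List Char :=
  ['A','B','C','D','E','F','G','H','I','J','K','L','M','N','O','P','Q','R','S','T']
def KEYSF : Finset Char := KEYSL.toFinset

-- K s = number of maze letters not occurring in s (the depth measure)
def K (s : String) : Nat := (KEYSF \ s.toList.toFinset).card

-- weight of one stack entry / of a stack (the while-loop measure)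
def muent (e : String × String) : Nat := 4 ^ (K (e.2 ++ e.1) + 1)
def W (st : List (String × String)) : Nat := (st.map muent).sum

-- every stack entry is a single maze letter
def Good (st : List (String × String)) : Prop :=
  ∀ e ∈ st, ∃ ch : Char, e.1 = ch.toString ∧ ch ∈ KEYSF

-- A-side value of a whole stack: first non-falsy goA result, entry by entry
def chainA : List (String × String) → String → Option String
  | [], _ => none
  | (n, r) :: rest, finish =>
    match goA 25 n finish r with
    | some s => if s = "" then chainA rest finish else some s
    | none => chainA rest finish

set_option maxRecDepth 2000 in
lemma maze_get_props (n s : String) (h : MAZE.get? n = some s) :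
    n.toList.length = 1 ∧ s.toList.length ≤ 3 ∧ ∀ ch ∈ s.toList, ch ∈ KEYSF := by
  have hm := PySem.Dict.mem_items_of_get?_eq_some MAZE h
  have hall : MAZE.items.all
      (fun p => (p.1.toList.length == 1) && (decide (p.2.toList.length ≤ 3)) &&
        p.2.toList.all (fun c => KEYSL.contains c)) = true := by decide
  have hp := List.all_eq_true.mp hall _ hm
  simp only [Bool.and_eq_true, beq_iff_eq, decide_eq_true_eq, List.all_eq_true,
    List.contains_eq_mem, decide_eq_true_eq] at hp
  refine ⟨hp.1.1, hp.1.2, fun ch hch => ?_⟩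
  have := hp.2 ch hch
  simpa [KEYSF, List.mem_toFinset] using this

lemma key_isSome (ch : Char) (h : ch ∈ KEYSF) : (MAZE.get? ch.toString).isSome = true := by
  have h' : ch ∈ KEYSL := by simpa [KEYSF, List.mem_toFinset] using h
  fin_cases h' <;>
    first
    | (rw [show 'A'.toString = "A" from rfl]; decide)
    | (rw [show 'B'.toString = "B" from rfl]; decide)
    | (rw [show 'C'.toString = "C" from rfl]; decide)
    | (rw [show 'D'.toString = "D" from rfl]; decide)
    | (rw [show 'E'.toString = "E" from rfl]; decide)
    | (rw [show 'F'.toString = "F" from rfl]; decide)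
    | (rw [show 'G'.toString = "G" from rfl]; decide)
    | (rw [show 'H'.toString = "H" from rfl]; decide)
    | (rw [show 'I'.toString = "I" from rfl]; decide)
    | (rw [show 'J'.toString = "J" from rfl]; decide)
    | (rw [show 'K'.toString = "K" from rfl]; decide)
    | (rw [show 'L'.toString = "L" from rfl]; decide)
    | (rw [show 'M'.toString = "M" from rfl]; decide)
    | (rw [show 'N'.toString = "N" from rfl]; decide)
    | (rw [show 'O'.toString = "O" from rfl]; decide)
    | (rw [show 'P'.toString = "P" from rfl]; decide)
    | (rw [show 'Q'.toString = "Q" from rfl]; decide)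
    | (rw [show 'R'.toString = "R" from rfl]; decide)
    | (rw [show 'S'.toString = "S" from rfl]; decide)
    | (rw [show 'T'.toString = "T" from rfl]; decide)

lemma toList_str_append_char (s : String) (c : Char) :
    (s ++ c.toString).toList = s.toList ++ [c] := by
  rw [String.toList_append]
  simp

lemma K_le20 (s : String) : K s ≤ 20 := by
  have h := Finset.card_le_card (Finset.sdiff_subset (s := KEYSF) (t := s.toList.toFinset))
  have h20 : KEYSF.card = 20 := by decide
  simpa [K, h20] using h

lemma K_lt (s : String) (c : Char) (hc : c ∈ KEYSF) (hns : c ∉ s.toList) :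
    K (s ++ c.toString) < K s := by
  apply Finset.card_lt_card
  constructor
  · intro x hx
    simp only [Finset.mem_sdiff, List.mem_toFinset, toList_str_append_char, List.mem_append,
      List.mem_singleton] at hx ⊢
    exact ⟨hx.1, fun hxs => hx.2 (Or.inl hxs)⟩
  · intro hsup
    have hcm : c ∈ KEYSF \ s.toList.toFinset := by
      simp [Finset.mem_sdiff, List.mem_toFinset, hc, hns]
    have := hsup hcm
    simp [Finset.mem_sdiff, List.mem_toFinset] at this

-- result strings are at least as long as the rope they start from (so never empty inside the recursion)
lemma len_aux (df : Nat) :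
    (∀ c f r s, goA df c f r = some s → (r ++ c).toList.length ≤ s.toList.length) ∧
    (∀ ps f nr s, loopA df ps f nr = some s → nr.toList.length ≤ s.toList.length) := by
  induction df with
  | zero =>
    constructor
    · intro c f r s h; simp [goA] at h
    · intro ps
      induction ps with
      | nil => intro f nr s h; simp [loopA] at h
      | cons p ps ih => intro f nr s h; simp only [loopA, goA] at h; exact ih f nr s h
  | succ df ihd =>
    have hgo : ∀ c f r s, goA (df + 1) c f r = some s → (r ++ c).toList.length ≤ s.toList.length := by
      intro c f r s h
      simp only [goA] at h
      by_cases hcf : c = f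
      · subst hcf
        simp at h
        simp [← h]
      · rw [if_neg hcf] at h
        cases hg : MAZE.get? c with
        | none => rw [hg] at h; simp at h
        | some nbrs =>
          rw [hg] at h
          exact ihd.2 _ _ _ _ h
    refine ⟨hgo, ?_⟩
    intro ps
    induction ps with
    | nil => intro f nr s h; simp [loopA] at h
    | cons p ps ih =>
      intro f nr s h
      simp only [loopA] at h
      cases hg : goA (df + 1) p.toString f nr with
      | none => rw [hg] at h; exact ih f nr s h
      | some route =>
        rw [hg] at h
        by_cases hr : route = ""
        · simp only [hr, if_true] at h
          exact ih f nr s (by simpa using h)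
        · simp only [if_neg hr] at h
          have h1 := hgo _ _ _ _ hg
          have h2 : nr.toList.length ≤ (nr ++ p.toString).toList.length := by
            simp
          cases h; exact h2.trans h1

-- fuel stability of goA: any two fuels above the K-measure give the same result
lemma goA_fuel (k : Nat) : ∀ (df df' : Nat) (c f r : String),
    K (r ++ c) ≤ k → k + 1 ≤ df → k + 1 ≤ df' → goA df c f r = goA df' c f r := by
  induction k with
  | zero =>
    intro df df' c f r hK hdf hdf'
    obtain ⟨d, rfl⟩ : ∃ d, df = d + 1 := ⟨df - 1, by omega⟩
    obtain ⟨d', rfl⟩ : ∃ d', df' = d' + 1 := ⟨df' - 1, by omega⟩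
    simp only [goA]
    by_cases hcf : c = f
    · simp [hcf]
    · rw [if_neg hcf, if_neg hcf]
      cases hg : MAZE.get? c with
      | none => rfl
      | some nbrs =>
        have hch := (maze_get_props _ _ hg).2.2
        -- every portal would make K drop below 0: the filtered list can only be traversed vacuously
        have haux : ∀ ps, (∀ p ∈ ps, p ∈ KEYSF ∧ p ∉ (r ++ c).toList) →
            loopA d ps f (r ++ c) = loopA d' ps f (r ++ c) := by
          intro ps hps
          induction ps with
          | nil => simp [loopA]
          | cons p ps ih =>
            exfalso
            obtain ⟨hpk, hpn⟩ := hps p (by simp)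
            have h1 := K_lt (r ++ c) p hpk hpn
            omega
        exact haux _ (by
          intro p hp
          simp only [List.mem_filter, Bool.not_eq_true', List.contains_eq_mem,
            decide_eq_false_iff_not] at hp
          exact ⟨hch p hp.1, hp.2⟩)
  | succ k ihk =>
    intro df df' c f r hK hdf hdf'
    obtain ⟨d, rfl⟩ : ∃ d, df = d + 1 := ⟨df - 1, by omega⟩
    obtain ⟨d', rfl⟩ : ∃ d', df' = d' + 1 := ⟨df' - 1, by omega⟩
    simp only [goA]
    by_cases hcf : c = f
    · simp [hcf]
    · rw [if_neg hcf, if_neg hcf]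
      cases hg : MAZE.get? c with
      | none => rfl
      | some nbrs =>
        have hch := (maze_get_props _ _ hg).2.2
        have haux : ∀ ps, (∀ p ∈ ps, p ∈ KEYSF ∧ p ∉ (r ++ c).toList) →
            loopA d ps f (r ++ c) = loopA d' ps f (r ++ c) := by
          intro ps hps
          induction ps with
          | nil => simp [loopA]
          | cons p ps ih =>
            obtain ⟨hpk, hpn⟩ := hps p (by simp)
            have hKc : K ((r ++ c) ++ p.toString) ≤ k := by
              have := K_lt (r ++ c) p hpk hpn
              omega
            have hgo := ihk d d' p.toString f (r ++ c) hKc (by omega) (by omega)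
            simp only [loopA, hgo]
            cases goA d' p.toString f (r ++ c) with
            | none => exact ih (fun q hq => hps q (by simp [hq]))
            | some route =>
              by_cases hr : route = "" <;>
                simp [hr, ih (fun q hq => hps q (by simp [hq]))]
        exact haux _ (by
          intro p hp
          simp only [List.mem_filter, Bool.not_eq_true', List.contains_eq_mem,
            decide_eq_false_iff_not] at hp
          exact ⟨hch p hp.1, hp.2⟩)

-- pushing the reversed neighbour string onto the stack = the filtered portal list, mapped, in front
lemma push_eq (l : List Char) (nr : String) (st : List (String × String)) :
    l.reverse.foldl (fun st c => if !(nr.toList.contains c) then (c.toString, nr) :: st else st) st =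
      (l.filter (fun c => !(nr.toList.contains c))).map (fun c => (c.toString, nr)) ++ st := by
  induction l generalizing st with
  | nil => simp
  | cons a l ih =>
    simp only [List.reverse_cons, List.foldl_append, List.foldl_cons, List.foldl_nil, ih,
      List.filter_cons]
    by_cases ha : a ∈ nr.toList <;> simp [ha, List.contains_eq_mem]

-- popped chunk of an A-side stack: chainA over mapped portals = the loopA run over those portals
lemma chain_loop (ps : List Char) (f nr : String) (rest : List (String × String)) :
    chainA (ps.map (fun c => (c.toString, nr)) ++ rest) f =
      match loopA 24 ps f nr with
      | some s => if s = "" then chainA rest f else some s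
      | none => chainA rest f := by
  induction ps with
  | nil => simp [loopA]
  | cons p ps ih =>
    simp only [List.map_cons, List.cons_append, chainA]
    have hfs : goA 25 p.toString f nr = goA 24 p.toString f nr :=
      goA_fuel 20 25 24 p.toString f nr (K_le20 _) (by omega) (by omega)
    rw [hfs, ih]
    simp only [loopA]
    cases goA 24 p.toString f nr with
    | none => rfl
    | some route => by_cases hr : route = "" <;> simp [hr]

-- main simulation: on a Good stack with enough fuel, the iterative DFS equals the chained recursive DFS
lemma stepB_eq_chain (sf : Nat) : ∀ (st : List (String × String)) (f : String),
    Good st → W st ≤ sf → stepB sf st f = chainA st f := by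
  induction sf using Nat.strong_induction_on with
  | _ sf ih =>
    intro st f hgood hW
    match st with
    | [] => cases sf <;> simp [stepB, chainA]
    | (n, r) :: rest =>
      obtain ⟨ch, rfl, hch⟩ := hgood (n, r) (by simp)
      have hpos : 4 ≤ muent (ch.toString, r) := by
        have h1 : (1:Nat) ≤ 4 ^ K (r ++ ch.toString) := Nat.one_le_pow _ _ (by omega)
        have h2 : muent (ch.toString, r) = 4 ^ K (r ++ ch.toString) * 4 := by
          simp [muent, pow_succ]
        omega
      have hWhead : muent (ch.toString, r) ≤ W ((ch.toString, r) :: rest) := by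
        simp [W]
      obtain ⟨sf', rfl⟩ : ∃ sf', sf = sf' + 1 := ⟨sf - 1, by omega⟩
      simp only [stepB]
      by_cases hnf : ch.toString = f
      · -- finish popped: B returns r ++ ch; A's goA returns the same nonempty rope
        have hA : goA 25 ch.toString f r = some (r ++ ch.toString) := by
          rw [show (25:Nat) = 24 + 1 from rfl]
          simp only [goA]
          rw [if_pos hnf]
        have hne : ¬(r ++ ch.toString = "") := by
          intro h
          have := congrArg String.toList h
          rw [toList_str_append_char] at this
          simp at this
        rw [if_pos hnf]
        simp only [chainA, hA]
        rw [if_neg hne]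
      · rw [if_neg hnf]
        obtain ⟨nbrs, hg⟩ := Option.isSome_iff_exists.mp (key_isSome ch hch)
        obtain ⟨-, hle3, hchars⟩ := maze_get_props _ _ hg
        simp only [hg]
        rw [push_eq]
        have hmem : ∀ p ∈ nbrs.toList.filter
            (fun c => !((r ++ ch.toString).toList.contains c)),
            p ∈ KEYSF ∧ p ∉ (r ++ ch.toString).toList := by
          intro p hp
          simp only [List.mem_filter, Bool.not_eq_true', List.contains_eq_mem,
            decide_eq_false_iff_not] at hp
          exact ⟨hchars p hp.1, hp.2⟩
        set nr := r ++ ch.toString with hnr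
        set portals := nbrs.toList.filter (fun c => !(nr.toList.contains c)) with hport
        set children := portals.map (fun c => (c.toString, nr)) with hchild
        have hgood' : Good (children ++ rest) := by
          intro e he
          rcases List.mem_append.mp he with he | he
          · obtain ⟨c, hc, rfl⟩ := List.mem_map.mp he
            exact ⟨c, rfl, (hmem c hc).1⟩
          · exact hgood e (by simp [he])
        have hWc : W children ≤ 3 * 4 ^ K nr := by
          have hb : ∀ x ∈ children.map muent, x ≤ 4 ^ K nr := by
            intro x hx
            obtain ⟨e, he, rfl⟩ := List.mem_map.mp hx
            obtain ⟨c, hc, rfl⟩ := List.mem_map.mp he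
            have hlt := K_lt nr c (hmem c hc).1 (hmem c hc).2
            simp only [muent]
            exact Nat.pow_le_pow_right (by omega) (by omega)
          have hlen : (children.map muent).length ≤ 3 := by
            have h1 : portals.length ≤ nbrs.toList.length := List.length_filter_le _ _
            simp only [List.length_map, hchild]
            omega
          calc (children.map muent).sum ≤ (children.map muent).length * (4 ^ K nr) :=
                by simpa using List.sum_le_card_nsmul _ _ hb
            _ ≤ 3 * 4 ^ K nr := Nat.mul_le_mul_right _ hlen
        have hW' : W (children ++ rest) ≤ sf' := by
          have h1 : W ((ch.toString, r) :: rest) = 4 ^ (K nr + 1) + W rest := by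
            simp [W, muent, hnr]
          have h2 : W (children ++ rest) = W children + W rest := by simp [W]
          have h3 : (1:Nat) ≤ 4 ^ K nr := Nat.one_le_pow _ _ (by omega)
          have h4 : (4:Nat) ^ (K nr + 1) = 4 * 4 ^ K nr := by ring
          omega
        rw [ih sf' (by omega) (children ++ rest) f hgood' hW']
        rw [hchild, chain_loop]
        have hA : goA 25 ch.toString f r = loopA 24 portals f nr := by
          rw [show (25:Nat) = 24 + 1 from rfl]
          simp only [goA]
          rw [if_neg hnf]
          simp only [hg]
          rw [hport, hnr]
        simp only [chainA, hA]

-- ===== VERDICT (by name: the statement is the Claim_ definition above) =====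
theorem depthfirst_spec : Claim_equal_depthfirst := by
  intro c f r _ hpre
  unfold Spec_depthfirst depthfirst depthfirst_alt
  obtain ⟨M, hM⟩ : ∃ M, (4:Nat) ^ 21 = M + 1 := ⟨4 ^ 21 - 1, by norm_num⟩
  rw [hM]
  simp only [stepB]
  by_cases hcf : c = f
  · rw [if_pos hcf]
    rw [show (25:Nat) = 24 + 1 from rfl]
    simp only [goA]
    rw [if_pos hcf]
  · rw [if_neg hcf]
    obtain ⟨nbrs, hg⟩ := Option.isSome_iff_exists.mp (hpre.resolve_left hcf)
    obtain ⟨hlen1, hle3, hchars⟩ := maze_get_props _ _ hg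
    simp only [hg]
    rw [push_eq]
    have hmem : ∀ p ∈ nbrs.toList.filter (fun x => !((r ++ c).toList.contains x)),
        p ∈ KEYSF ∧ p ∉ (r ++ c).toList := by
      intro p hp
      simp only [List.mem_filter, Bool.not_eq_true', List.contains_eq_mem,
        decide_eq_false_iff_not] at hp
      exact ⟨hchars p hp.1, hp.2⟩
    set nr := r ++ c with hnr
    set portals := nbrs.toList.filter (fun x => !(nr.toList.contains x)) with hport
    set children := portals.map (fun x => (x.toString, nr)) with hchild
    have hgood : Good (children ++ []) := by
      intro e he
      simp only [List.append_nil] at he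
      obtain ⟨x, hx, rfl⟩ := List.mem_map.mp he
      exact ⟨x, rfl, (hmem x hx).1⟩
    have hW : W (children ++ []) ≤ M := by
      have hb : ∀ y ∈ children.map muent, y ≤ 4 ^ 20 := by
        intro y hy
        obtain ⟨e, he, rfl⟩ := List.mem_map.mp hy
        obtain ⟨x, hx, rfl⟩ := List.mem_map.mp he
        have hlt := K_lt nr x (hmem x hx).1 (hmem x hx).2
        have h20 := K_le20 nr
        simp only [muent]
        exact Nat.pow_le_pow_right (by omega) (by omega)
      have hlen : (children.map muent).length ≤ 3 := by
        have h1 : portals.length ≤ nbrs.toList.length := List.length_filter_le _ _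
        simp only [List.length_map, hchild]
        omega
      have hsum : (children.map muent).sum ≤ 3 * 4 ^ 20 := by
        calc (children.map muent).sum ≤ (children.map muent).length * (4 ^ 20) :=
              by simpa using List.sum_le_card_nsmul _ _ hb
          _ ≤ 3 * 4 ^ 20 := Nat.mul_le_mul_right _ hlen
      have hlt : (3:Nat) * 4 ^ 20 + 1 ≤ 4 ^ 21 := by norm_num
      have hWdef : W (children ++ []) = (children.map muent).sum := by simp [W]
      omega
    rw [stepB_eq_chain M (children ++ []) f hgood hW]
    rw [hchild, chain_loop]
    have hA : goA 25 c f r = loopA 24 portals f nr := by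
      rw [show (25:Nat) = 24 + 1 from rfl]
      simp only [goA]
      rw [if_neg hcf]
      simp only [hg]
      rw [hport, hnr]
    rw [hA]
    cases hl : loopA 24 portals f nr with
    | none => rfl
    | some s =>
      have hlenr := (len_aux 24).2 portals f nr s hl
      have hne : ¬(s = "") := by
        intro h
        subst h
        rw [show ("" : String).toList.length = 0 from rfl] at hlenr
        have h1 : nr.toList.length = r.toList.length + 1 := by
          rw [hnr, String.toList_append, List.length_append, hlen1]
        omega
      simp [hne]
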